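-- pv_equiv track=rewrite | github.com/unrealintegers/GTBot | bot/bot/utils.py | convert_args
-- ===== SOURCE A (Python) =====
-- from collections import defaultdict, namedtuple
--
-- def convert_args(args):
--     args = ['-_'] + list(args)
--     tree = defaultdict(list)
--     parents = [i for i in range(len(args)) if args[i][0] == '-']
--     parents.append(len(args))  # Add upper search limit
--     for i in range(len(parents) - 1):
--         arg = ' '.join(args[parents[i] + 1: parents[i + 1]])
--         tree[args[parents[i]][1:]].append(arg)
--     return tree
-- ===== SOURCE B (Python) =====
-- from collections import defaultdict
--
-- def convert_args(args):
--     tree = defaultdict(list)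
--     key, buf = '_', []
--     for token in args:
--         if token[0] == '-':
--             tree[key].append(' '.join(buf))
--             key, buf = token[1:], []
--         else:
--             buf.append(token)
--     tree[key].append(' '.join(buf))
--     return tree
-- ===== Notes on version B (the rewrite author's own statement) =====
-- stated objective: simpler
-- what changed: Replaced A's precomputed index table of flag positions plus slicing between consecutive indices by a single streaming pass that maintains a current key and a token buffer, flushing the buffer into the defaultdict at each flag and once at the end.
-- outside the precondition, e.g. on convert_args(['-a', '']): A raises IndexError, B raises IndexError
import Mathlib
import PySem

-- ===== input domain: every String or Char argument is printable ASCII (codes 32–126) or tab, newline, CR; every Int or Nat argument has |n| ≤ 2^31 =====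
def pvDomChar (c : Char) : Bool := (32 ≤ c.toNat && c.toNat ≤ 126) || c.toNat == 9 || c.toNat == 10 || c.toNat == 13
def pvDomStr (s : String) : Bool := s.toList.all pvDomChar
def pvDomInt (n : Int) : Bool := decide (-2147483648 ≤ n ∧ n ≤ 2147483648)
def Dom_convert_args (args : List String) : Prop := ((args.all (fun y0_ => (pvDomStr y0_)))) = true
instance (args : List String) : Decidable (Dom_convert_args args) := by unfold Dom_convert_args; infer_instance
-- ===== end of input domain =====

-- B replaces A's index table of flag positions + slicing by a single streaming pass with a
-- current-key/buffer accumulator (objective: simpler). Return-value equivalence only (A returns a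
-- defaultdict, rendered here as its items in insertion order).

-- ===== PORT A =====
def convert_args (args : List String) : List (String × List String) :=
  let args2 : List String := "-_" :: args
  let parents : List Int :=
    ((PySem.List.pyRange 0 (args2.length : Int) 1).filter
      (fun i => PySem.Str.pyGet? (PySem.List.pyGetD args2 i "") 0 == some '-'))
    ++ [(args2.length : Int)]
  ((PySem.List.pyRange 0 ((parents.length : Int) - 1) 1).foldl
    (fun tree i =>
      let p := PySem.List.pyGetD parents i 0
      let q := PySem.List.pyGetD parents (i + 1) 0
      let arg := PySem.Str.join " " (PySem.List.slice args2 (some (p + 1)) (some q))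
      tree.modify (PySem.Str.slice (PySem.List.pyGetD args2 p "") (some 1) none) []
        (· ++ [arg]))
    (PySem.Dict.empty : PySem.Dict String (List String))).items

-- ===== PORT B =====
def convert_args_alt (args : List String) : List (String × List String) :=
  let st :=
    args.foldl
      (fun (st : PySem.Dict String (List String) × String × List String) token =>
        if PySem.Str.pyGet? token 0 == some '-' then
          (st.1.modify st.2.1 [] (· ++ [PySem.Str.join " " st.2.2]),
           PySem.Str.slice token (some 1) none, [])
        else
          (st.1, st.2.1, st.2.2 ++ [token]))
      ((PySem.Dict.empty : PySem.Dict String (List String)), "_", ([] : List String))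
  (st.1.modify st.2.1 [] (· ++ [PySem.Str.join " " st.2.2])).items

-- ===== PRECONDITION & SPEC =====
-- Pre_ excludes argument lists containing an empty-string token: there Python A (and Python B)
-- raise IndexError on the `[0]` character access.
def Pre_convert_args (args : List String) : Prop := ∀ s ∈ args, s ≠ ""
instance (args : List String) : Decidable (Pre_convert_args args) := by
  unfold Pre_convert_args; infer_instance

def pvWitness_convert_args : List String := ["-a", "x", "y", "-b", "-a", "z"]

def Spec_convert_args (args : List String) (out : List (String × List String)) : Prop :=
  out = convert_args_alt args
instance (args : List String) (out : List (String × List String)) :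
    Decidable (Spec_convert_args args out) := by unfold Spec_convert_args; infer_instance

-- ===== CLAIM (what is proved, stated in full; the proofs are below) =====
def Claim_equal_convert_args : Prop :=
  ∀ (args : List String), Dom_convert_args args → Pre_convert_args args →
    Spec_convert_args args (convert_args args)

-- ===== LEMMAS AND PROOFS =====

-- `token[0] == '-'` test, shared vocabulary of the proof layer
def pvFlag (s : String) : Bool := PySem.Str.pyGet? s 0 == some '-'

-- the dict-update step both loops perform: tree[k].append(v)
def pvStep (tree : PySem.Dict String (List String)) (p : String × String) :
    PySem.Dict String (List String) :=
  tree.modify p.1 [] (· ++ [p.2])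

-- B's post-loop flush, kept folded so the induction can rewrite with it
def pvFinish (st : PySem.Dict String (List String) × String × List String) :
    PySem.Dict String (List String) :=
  st.1.modify st.2.1 [] (· ++ [PySem.Str.join " " st.2.2])

-- segment decomposition: (key, joined buffer) pairs in emission order
def pvSegs (key : String) (buf : List String) : List String → List (String × String)
  | [] => [(key, PySem.Str.join " " buf)]
  | t :: ts =>
    if pvFlag t then
      (key, PySem.Str.join " " buf) ::
        pvSegs (PySem.Str.slice t (some 1) none) [] ts
    else
      pvSegs key (buf ++ [t]) ts

-- flag-index list over Nat (proof-layer mirror of A's `parents` comprehension)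
def pvPN : List String → List Nat
  | [] => []
  | x :: xs => (if pvFlag x then [0] else []) ++ (pvPN xs).map (· + 1)

-- A's loop, rewritten over Nat index pairs
def pvLoopA (l : List String) (tree : PySem.Dict String (List String)) :
    PySem.Dict String (List String) :=
  (((pvPN l) ++ [l.length]).zip ((pvPN l) ++ [l.length]).tail).foldl
    (fun tree pq =>
      pvStep tree (PySem.Str.slice (l.getD pq.1 "") (some 1) none,
        PySem.Str.join " " ((l.drop (pq.1 + 1)).take (pq.2 - (pq.1 + 1)))))
    tree

theorem pvSegs_nonflag (key : String) (buf buf2 rest : List String)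
    (h : ∀ t ∈ buf2, pvFlag t = false) :
    pvSegs key buf (buf2 ++ rest) = pvSegs key (buf ++ buf2) rest := by
  induction buf2 generalizing buf with
  | nil => simp
  | cons t ts ih =>
    have ht : pvFlag t = false := h t (List.mem_cons_self)
    simp only [List.cons_append, pvSegs, ht, Bool.false_eq_true, if_false]
    rw [ih (buf ++ [t]) (fun x hx => h x (List.mem_cons_of_mem _ hx))]
    simp

theorem pvPN_append_nonflag (buf rest : List String)
    (h : ∀ t ∈ buf, pvFlag t = false) :
    pvPN (buf ++ rest) = (pvPN rest).map (· + buf.length) := by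
  induction buf with
  | nil => simp
  | cons t ts ih =>
    have ht : pvFlag t = false := h t (List.mem_cons_self)
    simp only [List.cons_append, pvPN, ht, Bool.false_eq_true, if_false, List.nil_append]
    rw [ih (fun x hx => h x (List.mem_cons_of_mem _ hx))]
    simp only [List.map_map]
    apply List.map_congr_left
    intro x _
    simp only [Function.comp_apply, List.length_cons]
    omega

theorem pvPN_nil_of_nonflag (buf : List String) (h : ∀ t ∈ buf, pvFlag t = false) :
    pvPN buf = [] := by
  have := pvPN_append_nonflag buf [] h
  simpa [pvPN] using this

-- getD through a shift of indices into a suffix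
theorem pvGetD_shift (l1 l2 : List String) (j : Nat) :
    (l1 ++ l2).getD (l1.length + j) "" = l2.getD j "" := by
  rw [List.getD_eq_getElem?_getD, List.getD_eq_getElem?_getD,
    List.getElem?_append_right (by omega)]
  have h : l1.length + j - l1.length = j := by omega
  rw [h]

-- the main segment lemma: A's Nat-pair loop on a flag-headed list computes the segment fold
theorem pvLoopA_eq (n : Nat) : ∀ (xs : List String), xs.length ≤ n →
    ∀ (k : String) (tree : PySem.Dict String (List String)), pvFlag k = true →
    pvLoopA (k :: xs) tree =
      (pvSegs (PySem.Str.slice k (some 1) none) [] xs).foldl pvStep tree := by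
  induction n with
  | zero =>
    intro xs hxs k tree hk
    have : xs = [] := List.eq_nil_of_length_eq_zero (Nat.le_zero.mp hxs)
    subst this
    simp [pvLoopA, pvPN, hk, pvSegs, pvStep]
  | succ n ih =>
    intro xs hxs k tree hk
    obtain ⟨buf, rest, hsplit, hbuf, hrest⟩ :
        ∃ buf rest, xs = buf ++ rest ∧ (∀ t ∈ buf, pvFlag t = false) ∧
          (rest = [] ∨ ∃ k' rest', rest = k' :: rest' ∧ pvFlag k' = true) := by
      refine ⟨xs.takeWhile (fun t => !pvFlag t), xs.dropWhile (fun t => !pvFlag t),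
        (List.takeWhile_append_dropWhile).symm, ?_, ?_⟩
      · intro t ht
        have := List.mem_takeWhile_imp ht
        simpa using this
      · rcases hdw : xs.dropWhile (fun t => !pvFlag t) with _ | ⟨k', rest'⟩
        · exact Or.inl rfl
        · refine Or.inr ⟨k', rest', rfl, ?_⟩
          have := List.head?_dropWhile_not (fun t => !pvFlag t) xs
          rw [hdw] at this
          simpa using this
    subst hsplit
    rcases hrest with rfl | ⟨k', rest', rfl, hk'⟩
    · -- no flag among the remaining tokens: exactly one segment
      simp only [List.append_nil] at hxs ⊢
      have hpn0 : pvPN (k :: buf) = [0] := by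
        simp [pvPN, hk, pvPN_nil_of_nonflag buf hbuf]
      have hsegs : pvSegs (PySem.Str.slice k (some 1) none) [] buf
          = [(PySem.Str.slice k (some 1) none, PySem.Str.join " " buf)] := by
        simpa [pvSegs] using
          pvSegs_nonflag (PySem.Str.slice k (some 1) none) [] buf [] hbuf
      rw [hsegs, pvLoopA, hpn0]
      simp [pvStep, List.getD_cons_zero, List.take_of_length_le]
    · -- a further flag k' follows the buffered tokens
      rw [pvSegs_nonflag _ [] buf (k' :: rest') hbuf]
      simp only [List.nil_append, pvSegs, hk', if_true]
      set m := buf.length + 1 with hm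
      set big := k :: (buf ++ k' :: rest') with hbig
      have hbig' : big = (k :: buf) ++ (k' :: rest') := by simp [hbig]
      have hpnbig : pvPN big = 0 :: (pvPN (k' :: rest')).map (· + m) := by
        rw [hbig]
        simp only [pvPN, hk, if_true, pvPN_append_nonflag buf (k' :: rest') hbuf]
        simp only [List.map_map, List.singleton_append, List.cons.injEq, true_and]
        apply List.map_congr_left; intro x _
        simp only [Function.comp_apply]; omega
      have hpn' : pvPN (k' :: rest') = 0 :: (pvPN rest').map (· + 1) := by
        simp [pvPN, hk']
      have hlenbig : big.length = (k' :: rest').length + m := by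
        rw [hbig]; simp; omega
      have hdrop : ∀ j, big.drop (j + m) = (k' :: rest').drop j := by
        intro j
        rw [hbig', show j + m = (k :: buf).length + j from by simp [hm]; omega]
        exact List.drop_length_add_append j
      have hgetD : ∀ j, big.getD (j + m) "" = (k' :: rest').getD j "" := by
        intro j
        rw [hbig', show j + m = (k :: buf).length + j from by simp [hm]; omega]
        exact pvGetD_shift _ _ j
      set P : List Nat := pvPN (k' :: rest') ++ [(k' :: rest').length] with hP
      have hPc : ∃ p0 Ptl, P = p0 :: Ptl ∧ p0 = 0 := by
        rw [hP, hpn']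
        exact ⟨_, _, rfl, rfl⟩
      obtain ⟨p0, Ptl, hPeq, hp0⟩ := hPc
      have hshape : pvPN big ++ [big.length] = 0 :: P.map (· + m) := by
        rw [hpnbig, hlenbig, hP]
        simp [Nat.add_comm]
      have hzip : ((0 :: P.map (· + m)).zip (0 :: P.map (· + m)).tail)
          = (0, p0 + m) :: ((P.map (· + m)).zip (P.map (· + m)).tail) := by
        rw [hPeq]; rfl
      rw [pvLoopA, hshape, hzip, hp0]
      simp only [List.foldl_cons]
      -- the first emitted pair is (k[1:], ' '.join(buf))
      have hfirst :
          pvStep tree (PySem.Str.slice (big.getD 0 "") (some 1) none,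
            PySem.Str.join " " ((big.drop (0 + 1)).take (0 + m - (0 + 1))))
          = pvStep tree (PySem.Str.slice k (some 1) none, PySem.Str.join " " buf) := by
        have h1 : big.getD 0 "" = k := by rw [hbig]; rfl
        have h2 : (big.drop (0 + 1)).take (0 + m - (0 + 1)) = buf := by
          rw [hbig]; simp [hm]
        rw [h1, h2]
      rw [hfirst]
      -- the remaining pairs are those of (k' :: rest'), shifted by m
      have hzipmap : ((P.map (· + m)).zip (P.map (· + m)).tail)
          = (P.zip P.tail).map (fun pq => (pq.1 + m, pq.2 + m)) := by
        rw [← List.map_tail, List.zip_map]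
        apply List.map_congr_left; intro pq _; cases pq; rfl
      rw [hzipmap, List.foldl_map]
      have hcong :
          (P.zip P.tail).foldl
            (fun tree pq =>
              pvStep tree (PySem.Str.slice (big.getD (pq.1 + m) "") (some 1) none,
                PySem.Str.join " "
                  ((big.drop (pq.1 + m + 1)).take (pq.2 + m - (pq.1 + m + 1)))))
            (pvStep tree (PySem.Str.slice k (some 1) none, PySem.Str.join " " buf))
          = (P.zip P.tail).foldl
            (fun tree pq =>
              pvStep tree (PySem.Str.slice ((k' :: rest').getD pq.1 "") (some 1) none,
                PySem.Str.join " "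
                  (((k' :: rest').drop (pq.1 + 1)).take (pq.2 - (pq.1 + 1)))))
            (pvStep tree (PySem.Str.slice k (some 1) none, PySem.Str.join " " buf)) := by
        apply PySem.List.foldl_congr_mem
        intro acc pq _
        have e1 : big.getD (pq.1 + m) "" = (k' :: rest').getD pq.1 "" := hgetD pq.1
        have e2 : big.drop (pq.1 + m + 1) = (k' :: rest').drop (pq.1 + 1) := by
          rw [show pq.1 + m + 1 = (pq.1 + 1) + m from by omega]
          exact hdrop (pq.1 + 1)
        have e3 : pq.2 + m - (pq.1 + m + 1) = pq.2 - (pq.1 + 1) := by omega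
        rw [e1, e2, e3]
      rw [hcong]
      -- fold over the pairs of (k' :: rest') is pvLoopA of the shorter list: recurse
      have hlen' : rest'.length ≤ n := by
        have : (buf ++ k' :: rest').length ≤ n + 1 := hxs
        simp at this; omega
      have hrec := ih rest' hlen' k'
        (pvStep tree (PySem.Str.slice k (some 1) none, PySem.Str.join " " buf)) hk'
      rw [pvLoopA, ← hP] at hrec
      exact hrec

-- B's fold computes the segment fold
theorem pvAltGo (args : List String) :
    ∀ (tree : PySem.Dict String (List String)) (key : String) (buf : List String),
    pvFinish
      (args.foldl
        (fun (st : PySem.Dict String (List String) × String × List String) token =>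
          if PySem.Str.pyGet? token 0 == some '-' then
            (st.1.modify st.2.1 [] (· ++ [PySem.Str.join " " st.2.2]),
             PySem.Str.slice token (some 1) none, [])
          else (st.1, st.2.1, st.2.2 ++ [token]))
        (tree, key, buf))
      = (pvSegs key buf args).foldl pvStep tree := by
  induction args with
  | nil => intro tree key buf; simp [pvSegs, pvStep, pvFinish]
  | cons t ts ih =>
    intro tree key buf
    simp only [List.foldl_cons]
    by_cases ht : pvFlag t = true
    · have ht' : (PySem.Str.pyGet? t 0 == some '-') = true := ht
      simp only [ht', if_true]
      rw [ih]
      simp [pvSegs, ht, pvStep]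
    · have ht' : (PySem.Str.pyGet? t 0 == some '-') = false := by
        simpa [pvFlag] using ht
      simp only [ht', Bool.false_eq_true, if_false]
      rw [ih]
      have ht'' : pvFlag t = false := by simpa [pvFlag] using ht
      simp [pvSegs, ht'']

-- getD through a map of the Nat-cast
theorem pvGetD_map_cast (PL : List Nat) (i : Nat) :
    (PL.map (fun x : Nat => (x : Int))).getD i 0 = ((PL.getD i 0 : Nat) : Int) := by
  simp only [List.getD_eq_getElem?_getD, List.getElem?_map]
  cases PL[i]? <;> simp

-- the comprehension over range(len(l)) selecting flag positions IS pvPN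
theorem pvPN_eq_filter (l : List String) :
    (List.range l.length).filter (fun i => pvFlag (l.getD i "")) = pvPN l := by
  induction l with
  | nil => simp [pvPN]
  | cons x xs ih =>
    rw [List.length_cons, List.range_succ_eq_map, List.filter_cons, List.filter_map]
    have hc : (fun i => pvFlag ((x :: xs).getD i "")) ∘ Nat.succ
        = fun i => pvFlag (xs.getD i "") := by
      funext i; rfl
    rw [hc, ih, pvPN]
    by_cases hx : pvFlag x
    · simp only [List.getD_cons_zero, hx, if_true]
      simp [Nat.succ_eq_add_one]
    · simp only [List.getD_cons_zero, hx, Bool.false_eq_true, if_false]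
      simp [Nat.succ_eq_add_one]

-- a fold over range(len(xs)-1) reading xs[i], xs[i+1] is a fold over consecutive pairs
theorem pvFoldl_range_zip {β : Type} (xs : List Nat) (g : β → Nat → Nat → β) :
    ∀ (init : β),
    (List.range (xs.length - 1)).foldl
      (fun acc i => g acc (xs.getD i 0) (xs.getD (i + 1) 0)) init
    = (xs.zip xs.tail).foldl (fun acc pq => g acc pq.1 pq.2) init := by
  induction xs with
  | nil => intro init; simp
  | cons x xs ih =>
    intro init
    rcases xs with _ | ⟨y, rest⟩
    · simp
    · rw [show (x :: y :: rest).length - 1 = (y :: rest).length from by simp,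
        show (y :: rest).length = rest.length + 1 from rfl, List.range_succ_eq_map,
        List.foldl_cons, List.foldl_map]
      calc (List.range rest.length).foldl
            (fun acc i => g acc ((x :: y :: rest).getD (Nat.succ i) 0)
              ((x :: y :: rest).getD (Nat.succ i + 1) 0))
            (g init ((x :: y :: rest).getD 0 0) ((x :: y :: rest).getD 1 0))
          = (List.range rest.length).foldl
            (fun acc i => g acc ((y :: rest).getD i 0) ((y :: rest).getD (i + 1) 0))
            (g init x y) := by
            apply PySem.List.foldl_congr_mem
            intro acc i _; rfl
        _ = (List.range ((y :: rest).length - 1)).foldl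
            (fun acc i => g acc ((y :: rest).getD i 0) ((y :: rest).getD (i + 1) 0))
            (g init x y) := by
            rw [show (y :: rest).length - 1 = rest.length from by simp]
        _ = ((y :: rest).zip (y :: rest).tail).foldl
            (fun acc pq => g acc pq.1 pq.2) (g init x y) := ih (g init x y)
        _ = ((x :: y :: rest).zip (x :: y :: rest).tail).foldl
            (fun acc pq => g acc pq.1 pq.2) init := by
            simp

-- the port of A, with its Int-index machinery discharged, is the Nat-pair loop
theorem pvA_eq_loopA (args : List String) :
    convert_args args = (pvLoopA ("-_" :: args) PySem.Dict.empty).items := by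
  simp only [convert_args]
  set big : List String := "-_" :: args with hbig
  set PL : List Nat := pvPN big ++ [big.length] with hPL
  have hcast : PySem.List.pyRange 0 (big.length : Int) 1
      = (List.range big.length).map (fun k : Nat => (k : Int)) := by
    rw [PySem.List.pyRange_one]
    simp
  have hfilter :
      ((PySem.List.pyRange 0 (big.length : Int) 1).filter
        (fun i => PySem.Str.pyGet? (PySem.List.pyGetD big i "") 0 == some '-'))
      ++ [(big.length : Int)]
      = PL.map (fun k : Nat => (k : Int)) := by
    rw [hcast, List.filter_map]
    have hcomp : (fun i : Int => PySem.Str.pyGet? (PySem.List.pyGetD big i "") 0 == some '-')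
        ∘ (fun k : Nat => (k : Int)) = fun i : Nat => pvFlag (big.getD i "") := by
      funext i
      simp [pvFlag, PySem.List.pyGetD_natCast]
    rw [hcomp, pvPN_eq_filter, hPL]
    simp
  rw [hfilter]
  have hlen : ((PL.map (fun k : Nat => (k : Int))).length : Int) - 1
      = ((PL.length - 1 : Nat) : Int) := by
    have : 1 ≤ PL.length := by rw [hPL]; simp
    simp only [List.length_map]
    omega
  rw [hlen, PySem.List.pyRange_one]
  have hrange : (((PL.length - 1 : Nat) : Int) - 0).toNat = PL.length - 1 := by simp
  rw [hrange]
  have hmapfun : (List.range (PL.length - 1)).map (fun k : Nat => ((0 : Int) + (k : Nat)))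
      = (List.range (PL.length - 1)).map (fun k : Nat => ((k : Nat) : Int)) := by
    apply List.map_congr_left; intro x _; simp
  rw [hmapfun, List.foldl_map]
  apply congrArg PySem.Dict.items
  calc (List.range (PL.length - 1)).foldl _ PySem.Dict.empty
      = (List.range (PL.length - 1)).foldl
          (fun tree i => pvStep tree
            (PySem.Str.slice (big.getD (PL.getD i 0) "") (some 1) none,
             PySem.Str.join " "
              ((big.drop (PL.getD i 0 + 1)).take
                (PL.getD (i + 1) 0 - (PL.getD i 0 + 1)))))
          PySem.Dict.empty := by
        apply PySem.List.foldl_congr_mem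
        intro acc i _
        simp only [PySem.List.pyGetD_natCast, pvGetD_map_cast]
        rw [show ((i : Nat) : Int) + 1 = (((i + 1 : Nat)) : Int) from by push_cast; ring]
        simp only [PySem.List.pyGetD_natCast, pvGetD_map_cast]
        rw [show ((PL.getD i 0 : Nat) : Int) + 1 = ((PL.getD i 0 + 1 : Nat) : Int) from by
          push_cast; ring]
        rw [PySem.List.slice_natCast]
        simp [pvStep]
    _ = (PL.zip PL.tail).foldl
          (fun tree pq => pvStep tree
            (PySem.Str.slice (big.getD pq.1 "") (some 1) none,
             PySem.Str.join " " ((big.drop (pq.1 + 1)).take (pq.2 - (pq.1 + 1)))))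
          PySem.Dict.empty :=
        pvFoldl_range_zip (β := PySem.Dict String (List String)) PL
          (fun tree p q => pvStep tree
            (PySem.Str.slice (big.getD p "") (some 1) none,
             PySem.Str.join " " ((big.drop (p + 1)).take (q - (p + 1)))))
          PySem.Dict.empty
    _ = pvLoopA big PySem.Dict.empty := by rw [pvLoopA, ← hPL]

-- ===== VERDICT (by name: the statement is the Claim_ definition above) =====
theorem convert_args_spec : Claim_equal_convert_args := by
  intro args _ _
  unfold Spec_convert_args
  rw [pvA_eq_loopA, pvLoopA_eq args.length args (Nat.le_refl _) "-_" PySem.Dict.empty rfl]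
  have halt : convert_args_alt args
      = ((pvSegs "_" [] args).foldl pvStep PySem.Dict.empty).items := by
    have h := pvAltGo args PySem.Dict.empty "_" []
    exact congrArg PySem.Dict.items h
  rw [halt]
  rfl
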